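-- pv_equiv track=rewrite | github.com/ncats/stitcher | scripts/stitcher-testing/stitcherRegressionDF.py | extendPaths
-- ===== SOURCE A (Python) =====
-- def extendPaths(paths, edges):
--     npaths = []
--     for path in paths:
--         for edge in edges:
--             if edge[0] == path[-1] and edge[1] not in path:
--                 npath = list(path)
--                 npath.append(edge[1])
--                 npaths.append(npath)
--     return npaths
-- ===== SOURCE B (Python) =====
-- def extendPaths(paths, edges):
--     # Group edges by source node once, then extend each path by adjacency lookup.
--     adj = {}
--     for s, d in edges:
--         adj.setdefault(s, []).append(d)
--     npaths = []
--     for path in paths: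
--         seen = set(path)
--         for d in adj.get(path[-1], []):
--             if d not in seen:
--                 npaths.append(path + [d])
--     return npaths
-- ===== Notes on version B (the rewrite author's own statement) =====
-- stated objective: alternative
-- what changed: B builds an adjacency dict (source -> successor list) once and a per-path membership set, replacing A's scan of every edge (with a list membership test) for every path; trades a one-off indexing pass for the removal of the inner edge scan.
-- outside the precondition, e.g. on extendPaths([[]], []): A returns [], B raises IndexError
import Mathlib
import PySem

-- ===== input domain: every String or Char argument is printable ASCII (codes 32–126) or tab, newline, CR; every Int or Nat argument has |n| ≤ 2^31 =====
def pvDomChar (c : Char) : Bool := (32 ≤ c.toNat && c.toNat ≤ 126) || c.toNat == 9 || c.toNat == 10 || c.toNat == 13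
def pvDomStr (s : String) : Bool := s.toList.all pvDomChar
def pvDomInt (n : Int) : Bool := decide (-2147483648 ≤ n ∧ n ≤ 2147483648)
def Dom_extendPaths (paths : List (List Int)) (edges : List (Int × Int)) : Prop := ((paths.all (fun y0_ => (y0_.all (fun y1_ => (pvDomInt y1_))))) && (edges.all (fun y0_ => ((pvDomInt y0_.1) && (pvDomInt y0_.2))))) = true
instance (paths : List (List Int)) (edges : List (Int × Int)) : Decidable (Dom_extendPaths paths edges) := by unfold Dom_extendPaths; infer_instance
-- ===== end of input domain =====

-- B groups edges into an adjacency dict by source once; return-value equivalence proved on inputs with no empty path.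

-- ===== PORT A =====
def extendPaths (paths : List (List Int)) (edges : List (Int × Int)) : List (List Int) :=
  paths.foldl (fun npaths path =>
    edges.foldl (fun np edge =>
      -- path[-1]: under Pre_ path is nonempty, so pyGet? is some; default 0 is never used inside Pre_
      if edge.1 == (PySem.List.pyGet? path (-1)).getD 0 && !(path.contains edge.2)
      then np ++ [path ++ [edge.2]] else np) npaths) []

-- ===== PORT B =====
def extendPaths_alt (paths : List (List Int)) (edges : List (Int × Int)) : List (List Int) :=
  let adj := edges.foldl (fun d p => d.modify p.1 [] (· ++ [p.2])) (PySem.Dict.empty : PySem.Dict Int (List Int))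
  paths.foldl (fun npaths path =>
    -- 'd not in set(path)' is membership of an Int in the elements of path
    npaths ++ ((adj.getD ((PySem.List.pyGet? path (-1)).getD 0) []).filter
      (fun d => !(path.contains d))).map (fun d => path ++ [d])) []

-- ===== PRECONDITION & SPEC =====
-- Pre_ excludes inputs containing an empty path: there Python A raises IndexError on path[-1]
-- whenever edges is nonempty (and with edges == [] A returns [] only because the inner loop never
-- runs, while B's adjacency lookup still evaluates path[-1] and raises).
def Pre_extendPaths (paths : List (List Int)) (edges : List (Int × Int)) : Prop :=
  ∀ p ∈ paths, p ≠ []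
instance (paths : List (List Int)) (edges : List (Int × Int)) : Decidable (Pre_extendPaths paths edges) := by unfold Pre_extendPaths; infer_instance

def pvWitness_extendPaths : List (List Int) × (List (Int × Int)) := ([[1, 2], [3]], [(2, 4), (2, 1), (3, 5)])

def Spec_extendPaths (paths : List (List Int)) (edges : List (Int × Int)) (out : List (List Int)) : Prop := out = extendPaths_alt paths edges
instance (paths : List (List Int)) (edges : List (Int × Int)) (out : List (List Int)) : Decidable (Spec_extendPaths paths edges out) := by unfold Spec_extendPaths; infer_instance

-- ===== CLAIM (what is proved, stated in full; the proofs are below) =====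
def Claim_equal_extendPaths : Prop := ∀ (paths : List (List Int)) (edges : List (Int × Int)), Dom_extendPaths paths edges → Pre_extendPaths paths edges → Spec_extendPaths paths edges (extendPaths paths edges)

-- ===== LEMMAS AND PROOFS =====

-- For one path, A's scan over all edges equals B's filtered adjacency-list extension.
theorem inner_eq (path : List Int) (edges : List (Int × Int)) (acc : List (List Int)) :
    edges.foldl (fun np edge =>
      if edge.1 == (PySem.List.pyGet? path (-1)).getD 0 && !(path.contains edge.2)
      then np ++ [path ++ [edge.2]] else np) acc
    = acc ++ (((edges.foldl (fun d p => d.modify p.1 [] (· ++ [p.2]))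
          (PySem.Dict.empty : PySem.Dict Int (List Int))).getD
            ((PySem.List.pyGet? path (-1)).getD 0) []).filter
        (fun d => !(path.contains d))).map (fun d => path ++ [d]) := by
  rw [PySem.Dict.getD_foldl_modify_append, PySem.Dict.getD_empty,
      PySem.List.foldl_append_if (fun edge : Int × Int =>
        edge.1 == (PySem.List.pyGet? path (-1)).getD 0 && !(path.contains edge.2))
        (fun edge => path ++ [edge.2])]
  simp [List.filter_map, List.filter_filter, Function.comp, Bool.and_comm]

-- ===== VERDICT (by name: the statement is the Claim_ definition above) =====
theorem extendPaths_spec : Claim_equal_extendPaths := by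
  intro paths edges _ _
  unfold Spec_extendPaths extendPaths extendPaths_alt
  simp only [inner_eq]
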